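-- pv_equiv track=rewrite | github.com/JUNYOUNG31/-Algorithm | programmers/algo/kakao_mobility2.py | solution
-- ===== SOURCE A (Python) =====
-- from collections import defaultdict
--
-- def solution(id_list, k):
--     arr = defaultdict(int)
--     for i in id_list:
--         temp = set(i.split())
--
--         for j in temp:
--             if arr[j] < k:
--                 arr[j] += 1
--
--     answer = 0
--     for i in arr:
--         answer += arr[i]
--
--     return answer
-- ===== SOURCE B (Python) =====
-- def solution(id_list, k):
--     tokens = []
--     for s in id_list:
--         tokens.extend(set(s.split()))
--     tokens.sort()
--     answer = 0
--     prev = None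
--     run = 0
--     for t in tokens:
--         if t == prev:
--             run += 1
--         else:
--             answer += min(run, k)
--             prev = t
--             run = 1
--     answer += min(run, k)
--     return answer
-- ===== Notes on version B (the rewrite author's own statement) =====
-- stated objective: alternative
-- what changed: Replaces the capped per-token dict counter with a flat list of per-string deduped tokens that is sorted once and scanned for run lengths, adding min(run, k) per run; no counter dict is kept.
-- outside the precondition, e.g. on solution(['a'], -1): A returns 0, B returns -2
import Mathlib
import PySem

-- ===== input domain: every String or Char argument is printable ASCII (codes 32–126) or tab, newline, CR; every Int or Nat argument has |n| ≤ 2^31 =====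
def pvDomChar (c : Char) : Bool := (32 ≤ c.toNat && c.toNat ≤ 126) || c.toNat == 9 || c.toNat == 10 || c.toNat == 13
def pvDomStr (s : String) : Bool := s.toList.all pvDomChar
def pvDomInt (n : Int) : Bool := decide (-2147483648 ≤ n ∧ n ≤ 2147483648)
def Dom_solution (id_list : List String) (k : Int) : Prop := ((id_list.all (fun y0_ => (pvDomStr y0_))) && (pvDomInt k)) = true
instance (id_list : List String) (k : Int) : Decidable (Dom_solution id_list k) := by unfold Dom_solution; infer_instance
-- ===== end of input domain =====

-- B replaces A's capped per-token dict counter by one flat list of per-string deduped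
-- tokens, sorted once and scanned by runs of equal tokens (alternative decomposition).

-- ===== PORT A =====
-- inner loop body of A: `if arr[j] < k: arr[j] += 1`, where reading `arr[j]` on a
-- defaultdict first materialises the key with value 0
def solStepA (k : Int) (arr : PySem.Dict String Int) (j : String) : PySem.Dict String Int :=
  let arr := if arr.contains j then arr else arr.insert j 0
  if arr.getD j 0 < k then arr.insert j (arr.getD j 0 + 1) else arr

def solution (id_list : List String) (k : Int) : Int :=
  let arr : PySem.Dict String Int :=
    id_list.foldl (fun arr i =>
      let temp : PySem.Set String := PySem.Set.ofList (PySem.Str.split₀ i)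
      temp.foldl (solStepA k) arr) PySem.Dict.empty
  arr.keys.foldl (fun answer i => answer + arr.getD i 0) 0

-- ===== PORT B =====
-- loop body of B's scan: state = (answer, prev, run); `t == prev` with prev = None is False
def solStepB (k : Int) (st : Int × Option String × Int) (t : String) : Int × Option String × Int :=
  if some t = st.2.1 then (st.1, st.2.1, st.2.2 + 1)
  else (st.1 + min st.2.2 k, some t, 1)

def solution_alt (id_list : List String) (k : Int) : Int :=
  let tokens : List String :=
    id_list.foldl (fun acc s => acc ++ PySem.Set.ofList (PySem.Str.split₀ s)) []
  let tokens := PySem.List.sorted tokens (fun x => x) false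
  let st := tokens.foldl (solStepB k) (0, none, 0)
  st.1 + min st.2.2 k

-- ===== PRECONDITION & SPEC =====
-- Pre_ restricts to the natural domain of a report cap, k ≥ 0: for a negative cap A's
-- guarded increment never fires so it returns 0, while B's run scan sums negative min(run, k).
def Pre_solution (id_list : List String) (k : Int) : Prop := 0 ≤ k
instance (id_list : List String) (k : Int) : Decidable (Pre_solution id_list k) := by unfold Pre_solution; infer_instance
def pvWitness_solution : List String × Int := (["muzi frodo", "muzi", "frodo muzi"], 2)
def Spec_solution (id_list : List String) (k : Int) (out : Int) : Prop := out = solution_alt id_list k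
instance (id_list : List String) (k : Int) (out : Int) : Decidable (Spec_solution id_list k out) := by unfold Spec_solution; infer_instance

-- ===== CLAIM (what is proved, stated in full; the proofs are below) =====
def Claim_equal_solution : Prop := ∀ (id_list : List String) (k : Int), Dom_solution id_list k → Pre_solution id_list k → Spec_solution id_list k (solution id_list k)

-- ===== LEMMAS AND PROOFS =====

-- group sum of a token list: min(size of the first group, k), then recurse on the rest
def runSum (k : Int) : List String → Int
  | [] => 0
  | t :: ts => min ((ts.count t : Int) + 1) k + runSum k (ts.filter (fun x => x ≠ t))
termination_by l => l.length
decreasing_by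
  refine Nat.lt_succ_of_le ?_
  simpa using List.length_filter_le _ ts.attach

lemma getD_stepA (k : Int) (d : PySem.Dict String Int) (j t : String) :
    (solStepA k d j).getD t 0 =
      if t = j then (if d.getD j 0 < k then d.getD j 0 + 1 else d.getD j 0)
      else d.getD t 0 := by
  unfold solStepA
  by_cases hc : d.contains j
  · simp only [hc, if_true]
    by_cases hlt : d.getD j 0 < k
    · simp [hlt, PySem.Dict.getD_insert]
    · simp [hlt]
      intro h; rw [h]
  · have h0 : d.getD j 0 = 0 := PySem.Dict.getD_of_not_contains d 0 (by simpa using hc)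
    simp only [hc, Bool.false_eq_true, if_false]
    have h1 : (d.insert j 0).getD j 0 = 0 := by simp
    rw [h1, h0]
    by_cases hlt : (0:Int) < k
    · simp only [hlt, if_true, PySem.Dict.getD_insert]
      split_ifs with h
      · simp
      · rfl
    · simp only [hlt, if_false, PySem.Dict.getD_insert]

lemma keys_stepA (k : Int) (d : PySem.Dict String Int) (j : String) :
    (solStepA k d j).keys = PySem.Set.add d.keys j := by
  unfold solStepA PySem.Set.add
  by_cases hc : d.contains j
  · have hm : PySem.Set.contains d.keys j = true := by
      have := (PySem.Dict.contains_iff_mem_keys d j).mp hc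
      simpa [PySem.Set.contains] using this
    simp only [hc, if_true, hm]
    by_cases hlt : d.getD j 0 < k
    · simp [hlt, PySem.Dict.keys_insert_of_contains d _ hc]
    · simp [hlt]
  · have hm : PySem.Set.contains d.keys j = false := by
      by_contra h
      have h' : PySem.Set.contains d.keys j = true := by revert h; cases PySem.Set.contains d.keys j <;> simp
      have : j ∈ d.keys := by simpa [PySem.Set.contains] using h'
      exact absurd ((PySem.Dict.contains_iff_mem_keys d j).mpr this) (by simpa using hc)
    simp only [hc, Bool.false_eq_true, if_false, hm]
    have hk2 : (d.insert j 0).keys = d.keys ++ [j] := PySem.Dict.keys_insert_of_not_contains d 0 (by simpa using hc)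
    have hg : (d.insert j 0).getD j 0 = 0 := by simp
    rw [hg]
    by_cases hlt : (0:Int) < k
    · simp only [hlt, if_true]
      rw [PySem.Dict.keys_insert_of_contains _ _ (PySem.Dict.contains_insert_self d j 0), hk2]
    · simp [hlt, hk2]

lemma foldA_getD (k : Int) (hk : 0 ≤ k) (L : List String) (t : String) :
    (L.foldl (solStepA k) PySem.Dict.empty).getD t 0 = min (L.count t : Int) k := by
  induction L using List.reverseRecOn generalizing t with
  | nil => simp [PySem.Dict.getD_empty]; omega
  | append_singleton L j ih =>
    rw [List.foldl_append]
    simp only [List.foldl_cons, List.foldl_nil]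
    rw [getD_stepA]
    have hcj : (0:Int) ≤ ((L.count j : Nat) : Int) := by positivity
    by_cases h : t = j
    · subst h
      rw [ih t, List.count_append, List.count_singleton]
      simp only [BEq.rfl, if_true]
      simp only [min_def]
      push_cast
      split_ifs <;> omega
    · rw [ih t, List.count_append]
      have hz : List.count t [j] = 0 := by
        simp only [List.count_singleton]
        simp only [beq_iff_eq, ite_eq_right_iff]
        exact fun h' => absurd h'.symm h
      rw [hz]
      simp [h]

lemma keys_foldA_gen (k : Int) (L : List String) (d : PySem.Dict String Int) :
    (L.foldl (solStepA k) d).keys = L.foldl PySem.Set.add d.keys := by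
  induction L generalizing d with
  | nil => rfl
  | cons j L ih => simp only [List.foldl_cons]; rw [ih, keys_stepA]

lemma keys_foldA (k : Int) (L : List String) :
    (L.foldl (solStepA k) PySem.Dict.empty).keys = PySem.Set.ofList L := by
  rw [keys_foldA_gen, PySem.Set.ofList_eq_foldl, PySem.Dict.keys_empty]

lemma foldl_setfold_eq_flatMap (k : Int) (g : String → List String) (xs : List String)
    (d : PySem.Dict String Int) :
    xs.foldl (fun d s => (g s).foldl (solStepA k) d) d = (xs.flatMap g).foldl (solStepA k) d := by
  induction xs generalizing d with
  | nil => rfl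
  | cons x xs ih => simp only [List.foldl_cons, List.flatMap_cons, List.foldl_append]; exact ih _

lemma scanB (k : Int) (l : List String) : ∀ (p : String) (r a : Int),
    List.Pairwise (· ≤ ·) (p :: l) →
    (l.foldl (solStepB k) (a, some p, r)).1 + min (l.foldl (solStepB k) (a, some p, r)).2.2 k
      = a + min (r + (l.count p : Int)) k + runSum k (l.filter (fun x => x ≠ p)) := by
  induction l with
  | nil =>
    intro p r a _
    simp [runSum]
  | cons t ts ih =>
    intro p r a hpw
    by_cases h : t = p
    · subst h
      simp only [List.foldl_cons, solStepB, if_true]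
      have := ih t (r + 1) a hpw.of_cons
      rw [this]
      have h1 : List.filter (fun x => decide (x ≠ t)) (t :: ts) = List.filter (fun x => decide (x ≠ t)) ts := by
        simp
      rw [h1, List.count_cons_self]
      push_cast
      omega
    · simp only [List.foldl_cons, solStepB]
      rw [if_neg (by simp [h])]
      have hthis := ih t 1 (a + min r k) hpw.of_cons
      rw [hthis]
      have hple : ∀ e ∈ t :: ts, p ≤ e := by
        intro e he
        exact List.rel_of_pairwise_cons hpw he
      have hnp : p ∉ t :: ts := by
        intro hmem
        rcases List.mem_cons.mp hmem with h1 | h1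
        · exact h h1.symm
        · exact h (le_antisymm (List.rel_of_pairwise_cons hpw.of_cons h1) (hple t List.mem_cons_self))
      have hc0 : List.count p (t :: ts) = 0 := List.count_eq_zero.mpr hnp
      have hf : List.filter (fun x => decide (x ≠ p)) (t :: ts) = t :: ts := by
        apply List.filter_eq_self.mpr
        intro x hx
        simp only [decide_eq_true_eq]
        intro hxp
        exact hnp (hxp ▸ hx)
      rw [hc0, hf, runSum]
      push_cast
      omega

lemma insert_erase_eq (s : Finset String) (t : String) : insert t s = insert t (s.erase t) := by
  ext x
  simp only [Finset.mem_insert, Finset.mem_erase]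
  constructor
  · rintro (rfl | hx)
    · exact Or.inl rfl
    · by_cases hxt : x = t
      · exact Or.inl hxt
      · exact Or.inr ⟨hxt, hx⟩
  · rintro (rfl | ⟨_, hx⟩)
    · exact Or.inl rfl
    · exact Or.inr hx

lemma runSum_eq_finset_aux (k : Int) (n : Nat) : ∀ (l : List String), l.length ≤ n →
    runSum k l = ∑ t ∈ l.toFinset, min ((List.count t l : Int)) k := by
  induction n with
  | zero =>
    intro l hl
    rw [Nat.le_zero, List.length_eq_zero_iff] at hl
    subst hl
    simp [runSum]
  | succ n ihn =>
    intro l hl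
    match l with
    | [] => simp [runSum]
    | t :: ts =>
    have hlen : (List.filter (fun x => decide (x ≠ t)) ts).length ≤ n := by
      have := List.length_filter_le (fun x => decide (x ≠ t)) ts
      simp at hl
      omega
    have ih := ihn _ hlen
    rw [runSum, ih]
    have hF : (List.filter (fun x => decide (x ≠ t)) ts).toFinset = ts.toFinset.erase t := by
      rw [List.toFinset_filter]
      simp only [decide_eq_true_eq]
      exact Finset.filter_ne' _ _
    rw [hF, List.toFinset_cons, insert_erase_eq]
    rw [Finset.sum_insert (Finset.notMem_erase t _)]
    have hcount : ∀ x ∈ ts.toFinset.erase t,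
        min ((List.count x (List.filter (fun y => decide (y ≠ t)) ts) : Int)) k
          = min ((List.count x (t :: ts) : Int)) k := by
      intro x hx
      have hxt : x ≠ t := (Finset.mem_erase.mp hx).1
      rw [List.count_filter (by simpa using hxt), List.count_cons_of_ne hxt.symm]
    rw [Finset.sum_congr rfl hcount, List.count_cons_self]
    push_cast
    ring

lemma runSum_eq_finset (k : Int) (l : List String) :
    runSum k l = ∑ t ∈ l.toFinset, min ((List.count t l : Int)) k :=
  runSum_eq_finset_aux k l.length l le_rfl

lemma setSum_eq_finset (L : List String) (g : String → Int) :
    ((PySem.Set.ofList L).map g).sum = ∑ t ∈ L.toFinset, g t := by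
  have hnd := PySem.Set.nodup_ofList L
  have hts : (PySem.Set.ofList L).toFinset = L.toFinset := by
    ext x
    simp [List.mem_toFinset, PySem.Set.mem_ofList]
  rw [← List.sum_toFinset g hnd, hts]

lemma altB_eq_runSum (k : Int) (hk : 0 ≤ k) (L : List String) :
    ((PySem.List.sorted L (fun x => x) false).foldl (solStepB k) (0, none, 0)).1
      + min ((PySem.List.sorted L (fun x => x) false).foldl (solStepB k) (0, none, 0)).2.2 k
      = runSum k (PySem.List.sorted L (fun x => x) false) := by
  have hpw : List.Pairwise (· ≤ ·) (PySem.List.sorted L (fun x => x) false) :=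
    PySem.List.sorted_pairwise L (fun x => x)
  rcases hSm : PySem.List.sorted L (fun x => x) false with _ | ⟨t, S'⟩
  · simp [runSum]
    omega
  · rw [hSm] at hpw
    simp only [List.foldl_cons, solStepB]
    rw [if_neg (by simp)]
    have h0 : min (0:Int) k = 0 := by omega
    have := scanB k S' t 1 (0 + min 0 k) hpw
    rw [this, runSum]
    omega

-- ===== VERDICT (by name: the statement is the Claim_ definition above) =====
theorem solution_spec : Claim_equal_solution := by
  unfold Claim_equal_solution
  intro id_list k _ hpre
  have hk : 0 ≤ k := hpre
  unfold Spec_solution solution solution_alt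
  simp only [foldl_setfold_eq_flatMap, PySem.List.foldl_append_eq_flatMap, List.nil_append]
  set L := id_list.flatMap (fun s => PySem.Set.ofList (PySem.Str.split₀ s)) with hL
  rw [PySem.List.foldl_add, keys_foldA]
  have hfun : (fun i => (L.foldl (solStepA k) PySem.Dict.empty).getD i 0)
      = fun t => min ((List.count t L : Int)) k := funext (fun t => by
        rw [foldA_getD k hk L t])
  rw [hfun, setSum_eq_finset, altB_eq_runSum k hk L, runSum_eq_finset, zero_add]
  have hperm := PySem.List.sorted_perm L (fun x => x) false
  rw [List.toFinset_eq_of_perm _ _ hperm]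
  refine (Finset.sum_congr rfl ?_).symm
  intro x hx
  rw [hperm.count_eq]
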